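-- pv_equiv track=rewrite | github.com/Ca-moes/FPRO | PE02/genealogy.py | genealogy
-- ===== SOURCE A (Python) =====
-- def genealogy(l):
--     l = sorted(l)
--     newlist = []
--     for tup in l:
--         ordem = tup[1]
--         if ordem == "sibling":
--             newlist.append(tup)
--     for tup in l:
--         ordem = tup[1]
--         if ordem == "parent":
--             newlist.append(tup)
--     for tup in l:
--         ordem = tup[1]
--         if ordem == "cousin":
--             newlist.append(tup)
--     for tup in l:
--         ordem = tup[1]
--         if ordem == "grandparent":
--             newlist.append(tup)
--     return newlist
-- ===== SOURCE B (Python) =====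
-- def genealogy(l):
--     sib, par, cou, gra = [], [], [], []
--     for tup in sorted(l):
--         cat = tup[1]
--         if cat == "sibling":
--             sib.append(tup)
--         elif cat == "parent":
--             par.append(tup)
--         elif cat == "cousin":
--             cou.append(tup)
--         elif cat == "grandparent":
--             gra.append(tup)
--     return sib + par + cou + gra
-- ===== Notes on version B (the rewrite author's own statement) =====
-- stated objective: alternative
-- what changed: Replaces A's four separate filtering passes over the sorted list with a single pass that dispatches each tuple into one of four category buckets, then concatenates the buckets in the fixed order.
import Mathlib
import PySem

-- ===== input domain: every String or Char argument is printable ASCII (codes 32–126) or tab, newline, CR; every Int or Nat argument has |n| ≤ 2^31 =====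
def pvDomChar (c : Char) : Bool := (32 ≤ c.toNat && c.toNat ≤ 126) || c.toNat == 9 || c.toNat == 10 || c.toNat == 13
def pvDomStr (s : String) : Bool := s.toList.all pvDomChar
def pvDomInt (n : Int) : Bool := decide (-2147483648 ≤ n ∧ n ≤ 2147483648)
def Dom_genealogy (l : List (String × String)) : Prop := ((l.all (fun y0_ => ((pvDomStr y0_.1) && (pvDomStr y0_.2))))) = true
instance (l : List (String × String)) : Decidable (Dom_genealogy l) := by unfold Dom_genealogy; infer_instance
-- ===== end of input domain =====

-- B replaces A's four filtering passes over the sorted list with one bucketing pass (single-pass dispatch into four category lists, then concatenation).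


-- ===== PORT A =====
def genealogy (l : List (String × String)) : List (String × String) :=
  let s := PySem.List.sorted2 l Prod.fst Prod.snd false
  let n1 := s.foldl (fun acc tup => if tup.2 == "sibling" then acc ++ [tup] else acc) []
  let n2 := s.foldl (fun acc tup => if tup.2 == "parent" then acc ++ [tup] else acc) n1
  let n3 := s.foldl (fun acc tup => if tup.2 == "cousin" then acc ++ [tup] else acc) n2
  s.foldl (fun acc tup => if tup.2 == "grandparent" then acc ++ [tup] else acc) n3

-- ===== PORT B =====
-- single pass: dispatch each tuple of the sorted list into one of four buckets
def genBuckets (s : List (String × String))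
    (acc : List (String × String) × List (String × String) × List (String × String) × List (String × String)) :
    List (String × String) × List (String × String) × List (String × String) × List (String × String) :=
  s.foldl (fun acc tup =>
    if tup.2 == "sibling" then (acc.1 ++ [tup], acc.2.1, acc.2.2.1, acc.2.2.2)
    else if tup.2 == "parent" then (acc.1, acc.2.1 ++ [tup], acc.2.2.1, acc.2.2.2)
    else if tup.2 == "cousin" then (acc.1, acc.2.1, acc.2.2.1 ++ [tup], acc.2.2.2)
    else if tup.2 == "grandparent" then (acc.1, acc.2.1, acc.2.2.1, acc.2.2.2 ++ [tup])
    else acc) acc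

def genealogy_alt (l : List (String × String)) : List (String × String) :=
  let b := genBuckets (PySem.List.sorted2 l Prod.fst Prod.snd false) ([], [], [], [])
  b.1 ++ (b.2.1 ++ (b.2.2.1 ++ b.2.2.2))

-- ===== PRECONDITION & SPEC =====
def Spec_genealogy (l : List (String × String)) (out : List (String × String)) : Prop := out = genealogy_alt l
instance (l : List (String × String)) (out : List (String × String)) : Decidable (Spec_genealogy l out) := by unfold Spec_genealogy; infer_instance

-- ===== CLAIM (what is proved, stated in full; the proofs are below) =====
def Claim_equal_genealogy : Prop := ∀ (l : List (String × String)), Dom_genealogy l → Spec_genealogy l (genealogy l)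

-- ===== LEMMAS AND PROOFS =====
theorem genBuckets_spec (s : List (String × String)) (a b c d : List (String × String)) :
    genBuckets s (a, b, c, d) =
      (a ++ s.filter (fun t => t.2 == "sibling"),
       b ++ s.filter (fun t => t.2 == "parent"),
       c ++ s.filter (fun t => t.2 == "cousin"),
       d ++ s.filter (fun t => t.2 == "grandparent")) := by
  induction s generalizing a b c d with
  | nil => simp [genBuckets]
  | cons x t ih =>
    simp only [genBuckets, List.foldl_cons, List.filter_cons] at *
    split_ifs with h1 h2 h3 h4 <;>
      simp_all [List.append_assoc]

-- ===== VERDICT (by name: the statement is the Claim_ definition above) =====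
theorem genealogy_spec : Claim_equal_genealogy := by
  intro l _
  unfold Spec_genealogy
  simp only [genealogy, genealogy_alt, genBuckets_spec,
    PySem.List.foldl_append_if_eq_filter]
  simp [List.append_assoc]
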